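-- pv_equiv track=rewrite | github.com/chiragvartak/graphs | diagram.py | dfsTreeHelper
-- ===== SOURCE A (Python) =====
-- def dfsTreeHelper(graph, node, parent, tree, added):
--     if not node in added: # Consider this node only if not already considered
--         if parent in tree:
--             tree[parent].append(node)
--             added[node] = True
--         else:
--             tree[parent] = [node]
--             added[node] = True
--         for child in graph[node]:
--             dfsTreeHelper(graph, child, node, tree, added)
--     return tree
-- ===== SOURCE B (Python) =====
-- def dfsTreeHelper(graph, node, parent, tree, added):
--     # Iterative DFS with an explicit stack of (node, parent) frames instead of recursion.
--     # Children are pushed in reverse so they are popped left-to-right, giving the same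
--     # preorder (and hence the same tree[parent] list orders) as the recursive version.
--     # Mutates tree and added in place, like the original.
--     stack = [(node, parent)]
--     while stack:
--         n, p = stack.pop()
--         if n in added:
--             continue
--         if p in tree:
--             tree[p].append(n)
--         else:
--             tree[p] = [n]
--         added[n] = True
--         for child in reversed(graph[n]):
--             stack.append((child, n))
--     return tree
-- ===== Notes on version B (the rewrite author's own statement) =====
-- stated objective: alternative
-- what changed: Replaces A's recursive DFS with an iterative DFS over an explicit LIFO stack of (node, parent) frames, pushing children in reverse so the preorder and every tree[parent] list order match exactly.
import Mathlib
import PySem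

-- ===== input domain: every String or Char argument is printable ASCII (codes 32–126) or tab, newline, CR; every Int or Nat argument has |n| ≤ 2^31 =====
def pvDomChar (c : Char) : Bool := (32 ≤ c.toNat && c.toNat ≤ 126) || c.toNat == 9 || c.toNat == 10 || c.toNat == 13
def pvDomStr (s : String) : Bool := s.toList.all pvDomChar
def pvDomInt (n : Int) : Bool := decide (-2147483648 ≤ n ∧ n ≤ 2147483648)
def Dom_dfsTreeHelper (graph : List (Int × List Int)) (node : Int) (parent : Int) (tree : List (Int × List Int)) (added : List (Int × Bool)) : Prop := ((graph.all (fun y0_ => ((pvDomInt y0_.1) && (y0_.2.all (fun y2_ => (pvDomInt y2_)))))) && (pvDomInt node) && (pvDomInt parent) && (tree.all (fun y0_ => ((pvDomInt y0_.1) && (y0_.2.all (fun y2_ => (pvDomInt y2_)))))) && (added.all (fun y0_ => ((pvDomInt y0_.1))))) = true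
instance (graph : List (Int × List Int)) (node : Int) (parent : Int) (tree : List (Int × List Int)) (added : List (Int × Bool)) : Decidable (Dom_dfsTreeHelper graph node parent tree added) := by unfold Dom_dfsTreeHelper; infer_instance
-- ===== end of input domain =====

-- B replaces A's recursion by an explicit-stack iterative DFS (same preorder, children pushed
-- reversed); equivalence is about the RETURN value — both Pythons also mutate tree/added in place
-- identically, but only the returned tree is compared here.

-- ===== PORT A =====
-- Recursive DFS of Source A.  The recursion terminates in Python because `added` grows; in Lean we
-- make it total with a fuel guard (`none` = fuel exhausted); graph.length + 2 fuel is proved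
-- sufficient below (dfsA_term), so the fallback branch is unreachable.
-- A `none` from `graph.get?` is where the Python raises KeyError (excluded by Pre_): we stop there.
mutual
def dfsA (graph : PySem.Dict Int (List Int)) :
    Nat → Int → Int → PySem.Dict Int (List Int) × PySem.Dict Int Bool →
    Option (PySem.Dict Int (List Int) × PySem.Dict Int Bool)
  | 0, _, _, _ => none
  | f+1, node, parent, (tree, added) =>
    if ((added.get? node).isSome) then some (tree, added)   -- `node in added`: return tree unchanged
    else
      let tree' := if (tree.get? parent).isSome
                   then tree.modify parent [] (fun l => l ++ [node])  -- tree[parent].append(node)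
                   else tree.insert parent [node]                      -- tree[parent] = [node]
      let added' := added.insert node true                             -- added[node] = True
      match graph.get? node with
      | none => some (tree', added')            -- Python raises KeyError here: outside Pre_
      | some children => dfsAList graph f children node (tree', added')
  termination_by f _ _ _ => (f, 0)

def dfsAList (graph : PySem.Dict Int (List Int)) :
    Nat → List Int → Int → PySem.Dict Int (List Int) × PySem.Dict Int Bool →
    Option (PySem.Dict Int (List Int) × PySem.Dict Int Bool)
  | _, [], _, st => some st
  | f, c :: cs, n, st =>
    match dfsA graph f c n st with                 -- dfsTreeHelper(graph, child, node, tree, added)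
    | none => none
    | some st' => dfsAList graph f cs n st'
  termination_by f cs _ _ => (f, cs.length + 1)
end

def dfsTreeHelper (graph : List (Int × List Int)) (node : Int) (parent : Int) (tree : List (Int × List Int)) (added : List (Int × Bool)) : List (Int × List Int) :=
  match dfsA (PySem.Dict.mk graph) (graph.length + 2) node parent (PySem.Dict.mk tree, PySem.Dict.mk added) with
  | some st => st.1.items
  | none => tree   -- unreachable: the fuel is proved sufficient (dfsA_term)

-- ===== PORT B =====
-- Work still to do once `a` is the visited-set: total adjacency length of the not-yet-visited
-- graph keys.  Used as the (proved-sufficient) fuel bound of the loop and as its measure.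
def pendWork (G : PySem.Dict Int (List Int)) (a : PySem.Dict Int Bool) : Nat :=
  ((G.keys.dedup.filter (fun k => (a.get? k).isNone)).map (fun k => (G.getD k []).length)).sum

-- Source B's while-loop.  Stack top is the list head; Python pushes reversed(children) at the END and
-- pops from the end, which is exactly prepending the children in order here.  Fuel guard only
-- (`none` = exhausted; proved unreachable via loopB_term).
def loopB (graph : PySem.Dict Int (List Int)) :
    Nat → List (Int × Int) → PySem.Dict Int (List Int) × PySem.Dict Int Bool →
    Option (PySem.Dict Int (List Int) × PySem.Dict Int Bool)
  | _, [], st => some st                                   -- while stack: ... exit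
  | 0, _ :: _, _ => none
  | f+1, (n, p) :: rest, (tree, added) =>
    if ((added.get? n).isSome) then loopB graph f rest (tree, added)   -- if n in added: continue
    else
      let tree' := if (tree.get? p).isSome
                   then tree.modify p [] (fun l => l ++ [n])           -- tree[p].append(n)
                   else tree.insert p [n]                              -- tree[p] = [n]
      let added' := added.insert n true                                -- added[n] = True
      match graph.get? n with
      | none => loopB graph f rest (tree', added')  -- Python raises KeyError here: outside Pre_
      | some children => loopB graph f (children.map (fun c => (c, n)) ++ rest) (tree', added')

def dfsTreeHelper_alt (graph : List (Int × List Int)) (node : Int) (parent : Int) (tree : List (Int × List Int)) (added : List (Int × Bool)) : List (Int × List Int) :=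
  match loopB (PySem.Dict.mk graph) (2 + pendWork (PySem.Dict.mk graph) (PySem.Dict.mk added)) [(node, parent)] (PySem.Dict.mk tree, PySem.Dict.mk added) with
  | some st => st.1.items
  | none => tree   -- unreachable: the fuel is proved sufficient (loopB_term)

-- ===== PRECONDITION & SPEC =====
-- Graph-theoretic reachable set of the input (NOT a run of either port): start from {node}, and
-- repeatedly add the listed children of every member that is a graph key and not already in
-- `added`.  graph.length + 1 rounds reach the fixpoint, since each round before the fixpoint
-- grows the set and new members only arise from distinct graph keys.
def pvReachStep (graph : List (Int × List Int)) (added : List (Int × Bool)) (s : List Int) : List Int :=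
  (s ++ (s.filter (fun n => ((PySem.Dict.mk graph).get? n).isSome && ((PySem.Dict.mk added).get? n).isNone)).flatMap
          (fun n => (PySem.Dict.mk graph).getD n [])).dedup

def pvReachIter (graph : List (Int × List Int)) (added : List (Int × Bool)) : Nat → List Int → List Int
  | 0, s => s
  | k+1, s => pvReachIter graph added k (pvReachStep graph added s)

def pvReach (graph : List (Int × List Int)) (node : Int) (added : List (Int × Bool)) : List Int :=
  pvReachIter graph added (graph.length + 1) [node]

-- Pre_ excludes exactly the inputs on which the Python raises KeyError: those where the DFS from
-- `node` reaches (through nodes that are graph keys and not in `added`) some node that is neither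
-- in `added` nor a graph key, so `graph[node]` fails.  A returns normally on every other input.
def Pre_dfsTreeHelper (graph : List (Int × List Int)) (node : Int) (parent : Int) (tree : List (Int × List Int)) (added : List (Int × Bool)) : Prop :=
  ∀ n ∈ pvReach graph node added,
    ((PySem.Dict.mk added).get? n).isSome = true ∨ ((PySem.Dict.mk graph).get? n).isSome = true
instance (graph : List (Int × List Int)) (node : Int) (parent : Int) (tree : List (Int × List Int)) (added : List (Int × Bool)) : Decidable (Pre_dfsTreeHelper graph node parent tree added) := by unfold Pre_dfsTreeHelper; infer_instance

def pvWitness_dfsTreeHelper : (List (Int × List Int)) × Int × Int × (List (Int × List Int)) × (List (Int × Bool)) :=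
  ([(0, [1, 2]), (1, [2]), (2, [])], 0, -1, [], [])

def Spec_dfsTreeHelper (graph : List (Int × List Int)) (node : Int) (parent : Int) (tree : List (Int × List Int)) (added : List (Int × Bool)) (out : List (Int × List Int)) : Prop := out = dfsTreeHelper_alt graph node parent tree added
instance (graph : List (Int × List Int)) (node : Int) (parent : Int) (tree : List (Int × List Int)) (added : List (Int × Bool)) (out : List (Int × List Int)) : Decidable (Spec_dfsTreeHelper graph node parent tree added out) := by unfold Spec_dfsTreeHelper; infer_instance

-- ===== CLAIM (what is proved, stated in full; the proofs are below) =====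
def Claim_equal_dfsTreeHelper : Prop := ∀ (graph : List (Int × List Int)) (node : Int) (parent : Int) (tree : List (Int × List Int)) (added : List (Int × Bool)), Dom_dfsTreeHelper graph node parent tree added → Pre_dfsTreeHelper graph node parent tree added → Spec_dfsTreeHelper graph node parent tree added (dfsTreeHelper graph node parent tree added)

-- ===== LEMMAS AND PROOFS =====

-- The not-yet-visited distinct graph keys: the common termination measure of both loops.
def unvis (G : PySem.Dict Int (List Int)) (a : PySem.Dict Int Bool) : List Int :=
  G.keys.dedup.filter (fun k => (a.get? k).isNone)

theorem pendWork_eq (G : PySem.Dict Int (List Int)) (a : PySem.Dict Int Bool) :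
    pendWork G a = ((unvis G a).map (fun k => (G.getD k []).length)).sum := rfl

theorem sum_filter_insert (l : List Int) (hnd : l.Nodup) (n : Int) (hn : n ∈ l)
    (a : PySem.Dict Int Bool) (h : (a.get? n).isNone = true) (g : Int → Nat) :
    ((l.filter (fun k => ((a.insert n true).get? k).isNone)).map g).sum + g n
      = ((l.filter (fun k => (a.get? k).isNone)).map g).sum := by
  induction l with
  | nil => cases hn
  | cons x t ih =>
    rcases List.nodup_cons.mp hnd with ⟨hxt, hndt⟩
    by_cases hx : x = n
    · subst hx
      have hfe : t.filter (fun k => ((a.insert x true).get? k).isNone)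
          = t.filter (fun k => (a.get? k).isNone) := by
        apply List.filter_congr
        intro y hy
        rw [PySem.Dict.get?_insert_of_ne a true (by rintro rfl; exact hxt hy)]
      simp [h, PySem.Dict.get?_insert_self, hfe]
      omega
    · have hnt : n ∈ t := by
        rcases List.mem_cons.mp hn with h' | h'
        · exact absurd h'.symm hx
        · exact h'
      have ih' := ih hndt hnt
      have hne : ((a.insert n true).get? x).isNone = (a.get? x).isNone := by
        rw [PySem.Dict.get?_insert_of_ne a true hx]
      by_cases hpx : (a.get? x).isNone = true
      · simp [hpx, hne]
        omega
      · simp at hpx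
        simp [hpx, hne]
        omega

theorem length_filter_insert (l : List Int) (hnd : l.Nodup) (n : Int) (hn : n ∈ l)
    (a : PySem.Dict Int Bool) (h : (a.get? n).isNone = true) :
    (l.filter (fun k => ((a.insert n true).get? k).isNone)).length + 1
      = (l.filter (fun k => (a.get? k).isNone)).length := by
  simpa using sum_filter_insert l hnd n hn a h (fun _ => 1)

theorem mem_unvis_of_key (G : PySem.Dict Int (List Int)) (a : PySem.Dict Int Bool)
    (n : Int) (ch : List Int) (hk : G.get? n = some ch) (h : (a.get? n).isNone = true) :
    n ∈ unvis G a := by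
  unfold unvis
  refine List.mem_filter.mpr ⟨List.mem_dedup.mpr ?_, h⟩
  by_contra hmem
  rw [(PySem.Dict.get?_eq_none_iff_not_mem_keys G n).mpr hmem] at hk
  cases hk

theorem unvis_insert_not_key (G : PySem.Dict Int (List Int)) (a : PySem.Dict Int Bool)
    (n : Int) (hk : G.get? n = none) : unvis G (a.insert n true) = unvis G a := by
  unfold unvis
  apply List.filter_congr
  intro x hx
  have hxn : x ≠ n := by
    rintro rfl
    exact ((PySem.Dict.get?_eq_none_iff_not_mem_keys G x).mp hk) (List.mem_dedup.mp hx)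
  rw [PySem.Dict.get?_insert_of_ne a true hxn]

theorem length_unvis_insert (G : PySem.Dict Int (List Int)) (a : PySem.Dict Int Bool)
    (n : Int) (ch : List Int) (hk : G.get? n = some ch) (h : (a.get? n).isNone = true) :
    (unvis G (a.insert n true)).length + 1 = (unvis G a).length := by
  have hm := List.mem_of_mem_filter (mem_unvis_of_key G a n ch hk h)
  simpa [unvis] using length_filter_insert _ (List.nodup_dedup G.keys) n hm a h

theorem pendWork_insert_key (G : PySem.Dict Int (List Int)) (a : PySem.Dict Int Bool)
    (n : Int) (ch : List Int) (hk : G.get? n = some ch) (h : (a.get? n).isNone = true) :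
    pendWork G (a.insert n true) + ch.length = pendWork G a := by
  have hm := List.mem_of_mem_filter (mem_unvis_of_key G a n ch hk h)
  have hs := sum_filter_insert G.keys.dedup (List.nodup_dedup G.keys) n hm a h
      (fun k => (G.getD k []).length)
  have hgd : G.getD n [] = ch := PySem.Dict.getD_of_get?_eq_some G [] hk
  simpa [pendWork, hgd] using hs

-- Fuel graph.length + 2 always suffices for port A, and the measure never grows.
theorem dfsA_term (G : PySem.Dict Int (List Int)) : ∀ f : Nat,
    (∀ n p st, (unvis G st.2).length < f →
       ∃ s, dfsA G f n p st = some s ∧ (unvis G s.2).length ≤ (unvis G st.2).length)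
  ∧ (∀ cs n st, (unvis G st.2).length < f →
       ∃ s, dfsAList G f cs n st = some s ∧ (unvis G s.2).length ≤ (unvis G st.2).length) := by
  intro f
  induction f with
  | zero => exact ⟨fun n p st h => absurd h (by omega), fun cs n st h => absurd h (by omega)⟩
  | succ f ih =>
    have PA : ∀ n p st, (unvis G st.2).length < f + 1 →
        ∃ s, dfsA G (f + 1) n p st = some s ∧ (unvis G s.2).length ≤ (unvis G st.2).length := by
      rintro n p ⟨tree, added⟩ hf
      by_cases hv : (added.get? n).isSome
      · exact ⟨(tree, added), by simp [dfsA, hv], le_rfl⟩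
      · have hnone : (added.get? n).isNone = true := by
          simp [Option.isNone_iff_eq_none] at hv ⊢
          exact hv
        cases hg : G.get? n with
        | none =>
          refine ⟨(if (tree.get? p).isSome then tree.modify p [] (fun l => l ++ [n])
                   else tree.insert p [n], added.insert n true), by simp [dfsA, hv, hg], ?_⟩
          simp [unvis_insert_not_key G added n hg]
        | some ch =>
          have hd := length_unvis_insert G added n ch hg hnone
          obtain ⟨s, hs, hm⟩ := ih.2 ch n
            (if (tree.get? p).isSome then tree.modify p [] (fun l => l ++ [n])
             else tree.insert p [n], added.insert n true) (by simp at hd hf ⊢; omega)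
          exact ⟨s, by simp [dfsA, hv, hg, hs], by simp at hd hm ⊢; omega⟩
    refine ⟨PA, ?_⟩
    intro cs
    induction cs with
    | nil => exact fun n st h => ⟨st, by simp [dfsAList], le_rfl⟩
    | cons c cs ihc =>
      intro n st h
      obtain ⟨s1, h1, m1⟩ := PA c n st h
      obtain ⟨s, h2, m2⟩ := ihc n s1 (by omega)
      exact ⟨s, by simp [dfsAList, h1, h2], le_trans m2 m1⟩

-- Fuel 2 + pendWork always suffices for port B's loop.
theorem loopB_term (G : PySem.Dict Int (List Int)) : ∀ (f : Nat) stack st,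
    stack.length + pendWork G st.2 < f → ∃ s, loopB G f stack st = some s := by
  intro f
  induction f with
  | zero => exact fun stack st h => absurd h (by omega)
  | succ f ih =>
    rintro (_ | ⟨⟨n, p⟩, rest⟩) ⟨tree, added⟩ h
    · exact ⟨(tree, added), by simp [loopB]⟩
    · by_cases hv : (added.get? n).isSome
      · obtain ⟨s, hs⟩ := ih rest (tree, added) (by simp at h ⊢; omega)
        exact ⟨s, by simp [loopB, hv, hs]⟩
      · have hnone : (added.get? n).isNone = true := by
          simp [Option.isNone_iff_eq_none] at hv ⊢
          exact hv
        cases hg : G.get? n with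
        | none =>
          have hpe : pendWork G (added.insert n true) = pendWork G added := by
            rw [pendWork_eq, pendWork_eq, unvis_insert_not_key G added n hg]
          obtain ⟨s, hs⟩ := ih rest
            (if (tree.get? p).isSome then tree.modify p [] (fun l => l ++ [n])
             else tree.insert p [n], added.insert n true) (by simp [hpe] at h ⊢; omega)
          exact ⟨s, by simp [loopB, hv, hg, hs]⟩
        | some ch =>
          have hpe := pendWork_insert_key G added n ch hg hnone
          obtain ⟨s, hs⟩ := ih (ch.map (fun c => (c, n)) ++ rest)
            (if (tree.get? p).isSome then tree.modify p [] (fun l => l ++ [n])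
             else tree.insert p [n], added.insert n true) (by simp at h ⊢; omega)
          exact ⟨s, by simp [loopB, hv, hg, hs]⟩

theorem loopB_mono (G : PySem.Dict Int (List Int)) : ∀ (f : Nat) stack st out,
    loopB G f stack st = some out → loopB G (f + 1) stack st = some out := by
  intro f
  induction f with
  | zero =>
    rintro (_ | ⟨⟨n, p⟩, rest⟩) st out h
    · simpa [loopB] using h
    · simp [loopB] at h
  | succ f ih =>
    rintro (_ | ⟨⟨n, p⟩, rest⟩) ⟨tree, added⟩ out h
    · simpa [loopB] using h
    · by_cases hv : (added.get? n).isSome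
      · simp [loopB, hv] at h ⊢
        exact ih rest (tree, added) out h
      · cases hg : G.get? n with
        | none =>
          simp [loopB, hv, hg] at h ⊢
          exact ih rest _ out h
        | some ch =>
          simp [loopB, hv, hg] at h ⊢
          exact ih (ch.map (fun c => (c, n)) ++ rest) _ out h

theorem loopB_mono_le (G : PySem.Dict Int (List Int)) (f f' : Nat) (h : f ≤ f')
    (stack : List (Int × Int)) (st : PySem.Dict Int (List Int) × PySem.Dict Int Bool)
    (out : PySem.Dict Int (List Int) × PySem.Dict Int Bool)
    (hf : loopB G f stack st = some out) : loopB G f' stack st = some out := by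
  induction h with
  | refl => exact hf
  | step _ ih => exact loopB_mono G _ stack st out ih

-- The stack loop simulates the recursion: one recursive call = draining its frame off the stack.
theorem dfs_sim (G : PySem.Dict Int (List Int)) : ∀ (f : Nat) n p st s,
    dfsA G f n p st = some s →
    ∀ rest out, (∃ g, loopB G g rest s = some out) →
    ∃ g, loopB G g ((n, p) :: rest) st = some out := by
  intro f
  induction f with
  | zero => intro n p st s h; simp [dfsA] at h
  | succ f ih =>
    rintro n p ⟨tree, added⟩ s h rest out ⟨g, hg⟩
    by_cases hv : (added.get? n).isSome
    · simp [dfsA, hv] at h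
      exact ⟨g + 1, by simp [loopB, hv]; simpa [← h] using hg⟩
    · cases hgr : G.get? n with
      | none =>
        simp [dfsA, hv, hgr] at h
        exact ⟨g + 1, by simp [loopB, hv, hgr]; simpa [← h] using hg⟩
      | some ch =>
        simp [dfsA, hv, hgr] at h
        have L : ∀ cs st1 s1, dfsAList G f cs n st1 = some s1 →
            ∀ rest', (∃ g, loopB G g rest' s1 = some out) →
            ∃ g, loopB G g (cs.map (fun c => (c, n)) ++ rest') st1 = some out := by
          intro cs
          induction cs with
          | nil =>
            intro st1 s1 h1 rest' hex
            simp [dfsAList] at h1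
            subst h1
            simpa using hex
          | cons c cs ihc =>
            intro st1 s1 h1 rest' hex
            cases hA : dfsA G f c n st1 with
            | none => simp [dfsAList, hA] at h1
            | some s2 =>
              simp [dfsAList, hA] at h1
              have step := ihc s2 s1 h1 rest' hex
              simpa using ih c n st1 s2 hA (cs.map (fun c => (c, n)) ++ rest') out step
        obtain ⟨g2, hg2⟩ := L ch
          (if (tree.get? p).isSome then tree.modify p [] (fun l => l ++ [n])
           else tree.insert p [n], added.insert n true) s h rest ⟨g, hg⟩
        exact ⟨g2 + 1, by simp [loopB, hv, hgr, hg2]⟩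

-- ===== VERDICT (by name: the statement is the Claim_ definition above) =====
theorem dfsTreeHelper_spec : Claim_equal_dfsTreeHelper := by
  intro graph node parent tree added _ _
  unfold Spec_dfsTreeHelper
  have hμ : (unvis (PySem.Dict.mk graph) (PySem.Dict.mk added)).length < graph.length + 2 := by
    have h1 : (unvis (PySem.Dict.mk graph) (PySem.Dict.mk added)).length
        ≤ (PySem.Dict.mk graph).keys.dedup.length := List.length_filter_le _ _
    have h2 : (PySem.Dict.mk graph).keys.dedup.length ≤ (PySem.Dict.mk graph).keys.length :=
      (List.dedup_sublist _).length_le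
    have h3 : (PySem.Dict.mk graph).keys.length = graph.length := by
      simp [PySem.Dict.keys]
    omega
  obtain ⟨s, hA, -⟩ := (dfsA_term (PySem.Dict.mk graph) (graph.length + 2)).1 node parent
    (PySem.Dict.mk tree, PySem.Dict.mk added) hμ
  obtain ⟨r, hB⟩ := loopB_term (PySem.Dict.mk graph)
    (2 + pendWork (PySem.Dict.mk graph) (PySem.Dict.mk added)) [(node, parent)]
    (PySem.Dict.mk tree, PySem.Dict.mk added) (by simp)
  obtain ⟨g, hgs⟩ := dfs_sim (PySem.Dict.mk graph) (graph.length + 2) node parent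
    (PySem.Dict.mk tree, PySem.Dict.mk added) s hA [] s ⟨0, by simp [loopB]⟩
  have h1 := loopB_mono_le (PySem.Dict.mk graph) g
    (max g (2 + pendWork (PySem.Dict.mk graph) (PySem.Dict.mk added))) (le_max_left _ _) _ _ _ hgs
  have h2 := loopB_mono_le (PySem.Dict.mk graph)
    (2 + pendWork (PySem.Dict.mk graph) (PySem.Dict.mk added))
    (max g (2 + pendWork (PySem.Dict.mk graph) (PySem.Dict.mk added))) (le_max_right _ _) _ _ _ hB
  have hsr : s = r := by
    have := h1.symm.trans h2
    exact Option.some.inj this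
  simp [dfsTreeHelper, dfsTreeHelper_alt, hA, hB, hsr]
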